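-- pv_equiv track=rewrite | github.com/0xLoratadina/exercises-python | Ejer-3.py | sustituirDuplicados
-- ===== SOURCE A (Python) =====
-- def sustituirDuplicados(arr, n):  # int
--     entradasModificadas = 0  # int
--     vistos = []  # arr uni int, para almacenar los números ya vistos
--
--     for i in range(n):
--         if arr[i] in vistos:
--             arr[i] = -5  # Sustituimos el valor duplicado por -5
--             entradasModificadas += 1  # Contamos la modificación
--         else:
--             vistos.append(arr[i])  # Añadimos el valor al arreglo de vistos
--
--     return entradasModificadas
-- ===== SOURCE B (Python) =====
-- def sustituirDuplicados(arr, n):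
--     # Group the indices of arr[0:n] by value (insertion order), then mark
--     # every index after the first of each group.
--     groups = {}
--     for i in range(n):
--         groups.setdefault(arr[i], []).append(i)
--     entradasModificadas = 0
--     for idxs in groups.values():
--         for j in idxs[1:]:
--             arr[j] = -5
--             entradasModificadas += 1
--     return entradasModificadas
-- ===== Notes on version B (the rewrite author's own statement) =====
-- stated objective: faster
-- what changed: Replaces the interleaved membership-scan over a growing 'vistos' list by two passes: a dict grouping each value to the list of its indices, then a pass over the value-groups that marks and counts every index after the first of each group.
import Mathlib
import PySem

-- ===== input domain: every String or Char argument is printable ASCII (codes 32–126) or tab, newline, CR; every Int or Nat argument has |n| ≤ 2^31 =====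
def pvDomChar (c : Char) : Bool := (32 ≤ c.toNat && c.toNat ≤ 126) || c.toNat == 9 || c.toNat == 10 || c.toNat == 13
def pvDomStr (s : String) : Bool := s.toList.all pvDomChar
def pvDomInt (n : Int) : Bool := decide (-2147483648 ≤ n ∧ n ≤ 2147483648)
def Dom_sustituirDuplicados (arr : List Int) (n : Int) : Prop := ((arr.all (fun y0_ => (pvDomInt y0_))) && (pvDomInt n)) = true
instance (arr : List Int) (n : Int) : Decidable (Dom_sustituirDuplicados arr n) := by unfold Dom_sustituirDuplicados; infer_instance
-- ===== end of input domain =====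

-- B replaces A's O(n^2) membership-scan over a growing 'vistos' list by an O(n)
-- grouping pass (value -> list of its indices) followed by a pass over the groups;
-- both mutate arr the same way in Python, the claim here is about the return value.

-- ===== PORT A =====
-- one loop iteration of A: state = (arr, vistos, entradasModificadas)
def stepA (s : List Int × List Int × Int) (i : Int) : List Int × List Int × Int :=
  let x := PySem.List.pyGetD s.1 i 0
  if s.2.1.contains x then
    (PySem.List.pySetD s.1 i (-5), s.2.1, s.2.2 + 1)
  else
    (s.1, s.2.1 ++ [x], s.2.2)

def sustituirDuplicados (arr : List Int) (n : Int) : Int :=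
  ((PySem.List.pyRange 0 n 1).foldl stepA (arr, ([] : List Int), (0 : Int))).2.2

-- ===== PORT B =====
-- groups.setdefault(arr[i], []).append(i)  ==  d[arr[i]] = d.get(arr[i], []) + [i] at the same key position
def buildGroups (arr : List Int) (n : Int) : PySem.Dict Int (List Int) :=
  (PySem.List.pyRange 0 n 1).foldl
    (fun d i => d.modify (PySem.List.pyGetD arr i 0) [] (· ++ [i])) PySem.Dict.empty

def sustituirDuplicados_alt (arr : List Int) (n : Int) : Int :=
  ((buildGroups arr n).values.foldl
    (fun (s : List Int × Int) idxs =>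
      (PySem.List.slice idxs (some 1) none).foldl
        (fun (t : List Int × Int) j => (PySem.List.pySetD t.1 j (-5), t.2 + 1)) s)
    (arr, (0 : Int))).2

-- ===== PRECONDITION & SPEC =====
-- A (and B) raise IndexError exactly when n > len(arr); nothing else is excluded.
def Pre_sustituirDuplicados (arr : List Int) (n : Int) : Prop := n ≤ (arr.length : Int)
instance (arr : List Int) (n : Int) : Decidable (Pre_sustituirDuplicados arr n) := by
  unfold Pre_sustituirDuplicados; infer_instance

def pvWitness_sustituirDuplicados : List Int × Int := ([1, 2, 1, 3, 2, 1], 6)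

def Spec_sustituirDuplicados (arr : List Int) (n : Int) (out : Int) : Prop := out = sustituirDuplicados_alt arr n
instance (arr : List Int) (n : Int) (out : Int) : Decidable (Spec_sustituirDuplicados arr n out) := by unfold Spec_sustituirDuplicados; infer_instance

-- ===== CLAIM (what is proved, stated in full; the proofs are below) =====
def Claim_equal_sustituirDuplicados : Prop := ∀ (arr : List Int) (n : Int), Dom_sustituirDuplicados arr n → Pre_sustituirDuplicados arr n → Spec_sustituirDuplicados arr n (sustituirDuplicados arr n)

-- ===== LEMMAS AND PROOFS =====

-- Both programs compute |prefix| - |distinct values of the prefix|.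

-- A's loop invariant: after the first m iterations vistos is the ordered dedup of
-- the prefix, the counter is m - |vistos|, and the (mutated) array still agrees
-- with arr from position m on.
theorem loopA_inv (arr : List Int) (m : Nat) (hm : m ≤ arr.length) :
    ∃ a : List Int,
      (PySem.List.pyRange 0 (m : Int) 1).foldl stepA (arr, ([] : List Int), (0 : Int))
        = (a, PySem.List.dedup (arr.take m),
            (m : Int) - ((PySem.List.dedup (arr.take m)).length : Int))
      ∧ a.length = arr.length ∧ a.drop m = arr.drop m := by
  induction m with
  | zero =>
      refine ⟨arr, ?_, rfl, rfl⟩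
      simp [PySem.List.pyRange_one_eq_nil, PySem.List.dedup]
  | succ m ih =>
      obtain ⟨a, hfold, hlen, hdrop⟩ := ih (Nat.le_of_succ_le hm)
      have hmlt : m < arr.length := hm
      have hrange : PySem.List.pyRange 0 ((m + 1 : Nat) : Int) 1
          = PySem.List.pyRange 0 (m : Int) 1 ++ [(m : Int)] := by
        push_cast
        exact PySem.List.pyRange_one_succ_right (by positivity)
      -- the element read in iteration m is the original arr[m]
      have hget : PySem.List.pyGetD a (m : Int) 0 = arr[m] := by
        have h1 : a[m]? = arr[m]? := by
          have ha : (a.drop m)[0]? = a[m + 0]? := List.getElem?_drop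
          have hb : (arr.drop m)[0]? = arr[m + 0]? := List.getElem?_drop
          rw [hdrop] at ha
          simpa using ha.symm.trans hb
        simp [PySem.List.pyGetD_natCast, List.getD, h1, List.getElem?_eq_getElem hmlt]
      have htake : arr.take (m + 1) = arr.take m ++ [arr[m]] := by
        rw [List.take_add_one, List.getElem?_eq_getElem hmlt]
        rfl
      rw [hrange, List.foldl_append, hfold]
      by_cases hmem : arr[m] ∈ arr.take m
      · -- duplicate: arr[m] already seen
        have hd : PySem.List.dedup (arr.take (m + 1)) = PySem.List.dedup (arr.take m) := by
          rw [htake, PySem.List.dedup_eq_ofList, PySem.List.dedup_eq_ofList,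
            PySem.Set.ofList_append_singleton, PySem.Set.add]
          simp [PySem.Set.mem_ofList, hmem]
        refine ⟨PySem.List.pySetD a (m : Int) (-5), ?_, ?_, ?_⟩
        · simp only [List.foldl_cons, List.foldl_nil, stepA, hget, hd]
          have : (PySem.List.dedup (arr.take m)).contains arr[m] = true := by
            simp [hmem]
          simp only [this, if_pos]
          refine Prod.ext rfl (Prod.ext rfl ?_)
          push_cast; ring
        · simp [PySem.List.pySetD_natCast, hlen]
        · have hset : (PySem.List.pySetD a (m : Int) (-5)).drop (m + 1) = a.drop (m + 1) := by
            rw [PySem.List.pySetD_natCast]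
            exact List.drop_set_of_lt (by omega)
          have : a.drop (m + 1) = arr.drop (m + 1) := by
            rw [← List.drop_drop (i := 1) (j := m) (l := a),
              ← List.drop_drop (i := 1) (j := m) (l := arr), hdrop]
          rw [hset, this]
      · -- first occurrence
        have hd : PySem.List.dedup (arr.take (m + 1))
            = PySem.List.dedup (arr.take m) ++ [arr[m]] := by
          rw [htake, PySem.List.dedup_eq_ofList, PySem.List.dedup_eq_ofList,
            PySem.Set.ofList_append_singleton, PySem.Set.add]
          simp [PySem.Set.mem_ofList, hmem]
        refine ⟨a, ?_, hlen, ?_⟩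
        · simp only [List.foldl_cons, List.foldl_nil, stepA, hget, hd]
          have : (PySem.List.dedup (arr.take m)).contains arr[m] = false := by
            simp [hmem]
          simp only [this, Bool.false_eq_true, if_neg, not_false_iff]
          refine Prod.ext rfl (Prod.ext rfl ?_)
          simp only [List.length_append, List.length_cons, List.length_nil]
          push_cast; ring
        · rw [← List.drop_drop (i := 1) (j := m) (l := a),
            ← List.drop_drop (i := 1) (j := m) (l := arr), hdrop]

theorem A_eq (arr : List Int) (n : Int) (h : n ≤ (arr.length : Int)) :
    sustituirDuplicados arr n
      = ((arr.take n.toNat).length : Int)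
          - ((PySem.List.dedup (arr.take n.toNat)).length : Int) := by
  unfold sustituirDuplicados
  by_cases hn : n ≤ 0
  · have : n.toNat = 0 := by omega
    rw [PySem.List.pyRange_one_eq_nil hn]
    simp [this, PySem.List.dedup]
  · have hn' : n = (n.toNat : Int) := by omega
    have hlen : n.toNat ≤ arr.length := by omega
    obtain ⟨a, hfold, -, -⟩ := loopA_inv arr n.toNat hlen
    rw [hn', hfold, List.length_take, Int.toNat_natCast, Nat.min_eq_left hlen]

-- the inner marking loop only adds the length of its list to the counter
theorem innerFold_snd (l : List Int) (t : List Int × Int) :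
    (l.foldl (fun (t : List Int × Int) j => (PySem.List.pySetD t.1 j (-5), t.2 + 1)) t).2
      = t.2 + l.length := by
  induction l generalizing t with
  | nil => simp
  | cons x xs ih => rw [List.foldl_cons, ih]; simp only [List.length_cons]; push_cast; omega

-- the outer loop sums the tail-lengths of the value groups
theorem outerFold_snd (vs : List (List Int)) (s : List Int × Int) :
    (vs.foldl
        (fun (s : List Int × Int) idxs =>
          (PySem.List.slice idxs (some 1) none).foldl
            (fun (t : List Int × Int) j => (PySem.List.pySetD t.1 j (-5), t.2 + 1)) s) s).2
      = s.2 + (vs.map (fun v => ((PySem.List.slice v (some 1) none).length : Int))).sum := by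
  induction vs generalizing s with
  | nil => simp
  | cons v vs ih => rw [List.foldl_cons, ih, innerFold_snd]; simp only [List.map_cons, List.sum_cons]; ring

theorem cast_sum_nat (l : List Nat) : (l.map (Nat.cast : Nat → Int)).sum = (l.sum : Int) := by
  induction l with
  | nil => simp
  | cons x xs ih =>
      rw [List.map_cons, List.sum_cons, ih, List.sum_cons, Nat.cast_add]

-- Σ_{k ∈ d} (f k - 1) + |d| = Σ_{k ∈ d} f k  when every f k ≥ 1 (Nat)
theorem sum_sub_one (d : List Int) (f : Int → Nat) (h : ∀ k ∈ d, 1 ≤ f k) :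
    (d.map (fun k => f k - 1)).sum + d.length = (d.map f).sum := by
  induction d with
  | nil => simp
  | cons a t ih =>
      have h1 := h a (by simp)
      have h2 := ih (fun k hk => h k (by simp [hk]))
      simp only [List.map_cons, List.sum_cons, List.length_cons]
      omega

-- Σ_{k ∈ dedup xs} count k xs = |xs|
theorem sum_count_dedup (xs : List Int) :
    ((PySem.List.dedup xs).map (fun k => xs.count k)).sum = xs.length := by
  have hperm : (PySem.List.dedup xs).Perm xs.dedup :=
    (List.perm_ext_iff_of_nodup (PySem.List.nodup_dedup xs) (List.nodup_dedup xs)).mpr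
      (by intro x; simp)
  rw [(hperm.map (fun k => xs.count k)).sum_eq]
  exact List.sum_map_count_dedup_eq_length xs

-- the values read by B's grouping pass are exactly the prefix arr[0:n]
theorem vals_eq_take (arr : List Int) (n : Int) (h0 : 0 ≤ n) (h : n ≤ (arr.length : Int)) :
    (PySem.List.pyRange 0 n 1).map (fun i => PySem.List.pyGetD arr i 0) = arr.take n.toNat := by
  have hxlen : ((arr.take n.toNat).length : Int) = n := by
    rw [List.length_take]; omega
  have hcong : ∀ j ∈ PySem.List.pyRange 0 n 1,
      PySem.List.pyGetD arr j 0 = PySem.List.pyGetD (arr.take n.toNat) j 0 := by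
    intro j hj
    rw [PySem.List.mem_pyRange_one] at hj
    rw [PySem.List.pyGetD_eq_getElem arr 0 hj.1 (by omega),
      PySem.List.pyGetD_eq_getElem (arr.take n.toNat) 0 hj.1 (by
        rw [List.length_take]; push_cast; omega)]
    exact (List.getElem_take).symm
  rw [List.map_congr_left hcong]
  have hz := PySem.List.map_pyGetD_pyRange_zero' (arr.take n.toNat) 0
  rw [hxlen] at hz
  exact hz

theorem B_eq (arr : List Int) (n : Int) (h : n ≤ (arr.length : Int)) :
    sustituirDuplicados_alt arr n
      = ((arr.take n.toNat).length : Int)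
          - ((PySem.List.dedup (arr.take n.toNat)).length : Int) := by
  unfold sustituirDuplicados_alt
  by_cases hn : n ≤ 0
  · have hz : n.toNat = 0 := by omega
    have : buildGroups arr n = PySem.Dict.empty := by
      unfold buildGroups
      rw [PySem.List.pyRange_one_eq_nil hn]
      rfl
    rw [this]
    simp [hz, PySem.Dict.empty, PySem.Dict.values, PySem.List.dedup]
  · -- 0 < n ≤ len arr
    have h0 : (0:Int) ≤ n := by omega
    set xs := arr.take n.toNat with hxs
    -- pairs-of-(value, index) view of the grouping fold
    have hgroups : buildGroups arr n
        = ((PySem.List.pyRange 0 n 1).map (fun i => (PySem.List.pyGetD arr i 0, i))).foldl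
            (fun d p => d.modify p.1 [] (· ++ [p.2])) PySem.Dict.empty := by
      unfold buildGroups
      rw [List.foldl_map]
    set pairsL := (PySem.List.pyRange 0 n 1).map (fun i => (PySem.List.pyGetD arr i 0, i))
      with hpairs
    have hfst : pairsL.map Prod.fst = xs := by
      rw [hpairs, List.map_map]
      exact vals_eq_take arr n h0 h
    have hkeys : (buildGroups arr n).keys = PySem.List.dedup xs := by
      rw [hgroups, PySem.Dict.keys_foldl_modify_key pairsL Prod.fst [] (fun _ p => (· ++ [p.2]))]
      simp [PySem.Set.update_nil_left, hfst]
    have hnodup : (buildGroups arr n).keys.Nodup := by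
      rw [hkeys]; exact PySem.List.nodup_dedup xs
    have hgetD : ∀ k : Int, (buildGroups arr n).getD k [] =
        (pairsL.filter (fun p => p.1 == k)).map (·.2) := by
      intro k
      rw [hgroups, PySem.Dict.getD_foldl_modify_append pairsL PySem.Dict.empty k,
        PySem.Dict.getD_empty]
      simp
    have hlenv : ∀ k : Int, ((buildGroups arr n).getD k []).length = xs.count k := by
      intro k
      rw [hgetD k, List.length_map, ← List.countP_eq_length_filter,
        List.count_eq_countP, hxs, ← vals_eq_take arr n h0 h, List.countP_map,
        List.countP_map]
      rfl
    rw [PySem.Dict.values_eq_map_keys (buildGroups arr n) hnodup [], outerFold_snd]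
    rw [List.map_map]
    have hmap : ((buildGroups arr n).keys.map
          ((fun v => ((PySem.List.slice v (some 1) none).length : Int))
            ∘ fun k => (buildGroups arr n).getD k []))
        = (PySem.List.dedup xs).map (fun k => ((xs.count k - 1 : Nat) : Int)) := by
      rw [hkeys]
      refine List.map_congr_left ?_
      intro k _
      simp only [Function.comp]
      rw [PySem.List.slice_from_one, List.length_tail, hlenv k]
    rw [hmap]
    have hge : ∀ k ∈ PySem.List.dedup xs, 1 ≤ xs.count k := by
      intro k hk
      rw [PySem.List.mem_dedup] at hk
      exact List.count_pos_iff.mpr hk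
    have hsum := sum_sub_one (PySem.List.dedup xs) (fun k => xs.count k) hge
    rw [sum_count_dedup xs] at hsum
    rw [show ((PySem.List.dedup xs).map (fun k => ((xs.count k - 1 : Nat) : Int)))
        = ((PySem.List.dedup xs).map (fun k => xs.count k - 1)).map (Nat.cast : Nat → Int) from by
      rw [List.map_map]; rfl]
    rw [cast_sum_nat]
    have h2 : (((PySem.List.dedup xs).map (fun k => xs.count k - 1)).sum : Int)
        + ((PySem.List.dedup xs).length : Int) = (xs.length : Int) := by
      exact_mod_cast congrArg (Nat.cast : Nat → Int) hsum
    omega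

-- ===== VERDICT (by name: the statement is the Claim_ definition above) =====
theorem sustituirDuplicados_spec : Claim_equal_sustituirDuplicados := by
  intro arr n _ hpre
  unfold Spec_sustituirDuplicados
  rw [A_eq arr n hpre, B_eq arr n hpre]
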